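-- pv_equiv track=rewrite | github.com/AutoclickerI/Baekjoon | 백준/Diamond/31505. N진수 곱셈 （HUGE）/N진수 곱셈 （HUGE）.py | conv1
-- ===== SOURCE A (Python) =====
-- def conv1(r,n):
--     ret=[]
--     s=0
--     for i in range(len(r)+n-1):
--         if i<len(r):
--             s+=r[i]
--         if 0<=i-n:
--             s-=r[i-n]
--         ret+=s,
--     return ret
-- ===== SOURCE B (Python) =====
-- def conv1(r, n):
--     P = [0]
--     for x in r:
--         P.append(P[-1] + x)
--     L = len(r)
--     return [P[min(i + 1, L)] - P[max(0, i - n + 1)] for i in range(L + n - 1)]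
-- ===== Notes on version B (the rewrite author's own statement) =====
-- stated objective: alternative
-- what changed: B precomputes a prefix-sum table once and reads each window sum as an indexed difference of two table entries, instead of A's streaming accumulator that adds the entering element and subtracts the leaving one at every step.
-- outside the precondition, e.g. on conv1([1, 2, 3], -1): A returns [-1], B returns [-2]
import Mathlib
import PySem

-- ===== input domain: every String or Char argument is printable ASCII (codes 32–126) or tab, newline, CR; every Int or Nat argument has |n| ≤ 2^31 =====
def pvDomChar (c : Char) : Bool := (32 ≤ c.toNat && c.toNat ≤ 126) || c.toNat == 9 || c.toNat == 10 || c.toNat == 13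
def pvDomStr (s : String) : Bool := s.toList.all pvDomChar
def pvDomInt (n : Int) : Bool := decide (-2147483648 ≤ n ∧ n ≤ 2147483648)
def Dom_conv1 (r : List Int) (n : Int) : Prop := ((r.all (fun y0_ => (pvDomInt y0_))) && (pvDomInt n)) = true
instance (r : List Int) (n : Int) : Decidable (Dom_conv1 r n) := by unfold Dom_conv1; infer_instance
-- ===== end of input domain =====

-- B replaces A's streaming add/subtract running sum with a prefix-sum table read off by
-- indexed differences (objective: alternative, same cost).

-- ===== PORT A =====
-- the body of A's for-loop: s += r[i] when i < len(r); s -= r[i-n] when 0 <= i-n; ret += s,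
def stepA (r : List Int) (n : Int) (acc : List Int × Int) (i : Int) : List Int × Int :=
  let s1 := if i < (r.length : Int) then acc.2 + PySem.List.pyGetD r i 0 else acc.2
  let s2 := if 0 ≤ i - n then s1 - PySem.List.pyGetD r (i - n) 0 else s1
  (acc.1 ++ [s2], s2)

def conv1 (r : List Int) (n : Int) : List Int :=
  ((PySem.List.pyRange 0 ((r.length : Int) + n - 1) 1).foldl (stepA r n) ([], 0)).1

-- ===== PORT B =====
-- the body of B's prefix-table loop: P.append(P[-1] + x)
def stepP (p : List Int) (x : Int) : List Int := p ++ [PySem.List.pyGetD p (-1) 0 + x]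

def conv1_alt (r : List Int) (n : Int) : List Int :=
  let P := r.foldl stepP [0]
  let L : Int := (r.length : Int)
  (PySem.List.pyRange 0 (L + n - 1) 1).map
    (fun i => PySem.List.pyGetD P (min (i + 1) L) 0 - PySem.List.pyGetD P (max 0 (i - n + 1)) 0)

-- ===== PRECONDITION & SPEC =====
-- Pre_ excludes negative window sizes n < 0 whose output is nonempty, a degenerate corner no
-- caller would specify, where A's incremental accumulator and B's prefix-difference yield
-- different arbitrary values (when the output is empty both trivially agree, so those stay in).
def Pre_conv1 (r : List Int) (n : Int) : Prop := 0 ≤ n ∨ (r.length : Int) + n - 1 ≤ 0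
instance (r : List Int) (n : Int) : Decidable (Pre_conv1 r n) := by unfold Pre_conv1; infer_instance
def pvWitness_conv1 : List Int × Int := ([1, 2, 3], 2)

def Spec_conv1 (r : List Int) (n : Int) (out : List Int) : Prop := out = conv1_alt r n
instance (r : List Int) (n : Int) (out : List Int) : Decidable (Spec_conv1 r n out) := by unfold Spec_conv1; infer_instance

-- ===== CLAIM (what is proved, stated in full; the proofs are below) =====
def Claim_equal_conv1 : Prop := ∀ (r : List Int) (n : Int), Dom_conv1 r n → Pre_conv1 r n → Spec_conv1 r n (conv1 r n)

-- ===== LEMMAS AND PROOFS =====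

-- prefix sum of the first k elements
def psum (r : List Int) (k : Nat) : Int := (r.take k).sum

lemma psum_succ (r : List Int) (k : Nat) (hk : k < r.length) :
    psum r (k + 1) = psum r k + r.getD k 0 := by
  simp [psum, List.sum_take_succ r k hk, List.getD, List.getElem?_eq_getElem hk]

-- B's prefix-table fold, generalized over the accumulator
lemma pfold (r : List Int) (p : List Int) (hp : p ≠ []) :
    r.foldl stepP p
      = p ++ (List.range r.length).map
          (fun k => PySem.List.pyGetD p (-1) 0 + psum r (k + 1)) := by
  induction r generalizing p with
  | nil => simp
  | cons x r ih =>
    simp only [List.foldl_cons]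
    rw [show stepP p x = p ++ [PySem.List.pyGetD p (-1) 0 + x] from rfl]
    rw [ih (p ++ [PySem.List.pyGetD p (-1) 0 + x]) (by simp)]
    rw [List.append_assoc]
    congr 1
    rw [List.length_cons, List.range_succ_eq_map]
    simp only [List.map_cons, List.map_map, PySem.List.pyGetD_neg_one_append_singleton,
      List.singleton_append]
    refine congrArg₂ List.cons ?_ ?_
    · simp [psum]
    · apply List.map_congr_left
      intro k _
      simp only [Function.comp, psum, Nat.succ_eq_add_one, List.take_succ_cons, List.sum_cons]
      ring

-- B's table P is the prefix-sum table
lemma ptable (r : List Int) :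
    r.foldl stepP [0] = (List.range (r.length + 1)).map (psum r) := by
  have hc : PySem.List.pyGetD [0] (-1) 0 = (0 : Int) := rfl
  rw [pfold r [0] (by simp), List.range_succ_eq_map]
  simp only [hc, zero_add, List.map_cons, List.map_map, List.singleton_append]
  refine congrArg₂ List.cons ?_ ?_
  · simp [psum]
  · apply List.map_congr_left
    intro k _
    simp [Function.comp, psum]

-- closed form of A's running sum after m loop iterations
def aS (r : List Int) (n' : Nat) (m : Nat) : Int := psum r (min m r.length) - psum r (m - n')

lemma pairS (xs : List Int) {a b : Int} (h : a = b) :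
    ((xs ++ [a], a) : List Int × Int) = (xs ++ [b], b) := by rw [h]

lemma aS_step (r : List Int) (n : Int) (hn : 0 ≤ n) (m : Nat)
    (hm : (m : Int) < (r.length : Int) + n - 1) (xs : List Int) :
    stepA r n (xs, aS r n.toNat m) (m : Int)
      = (xs ++ [aS r n.toNat (m + 1)], aS r n.toNat (m + 1)) := by
  have hget : PySem.List.pyGetD r (m : Int) 0 = r.getD m 0 := PySem.List.pyGetD_natCast r m 0
  unfold stepA
  simp only [hget]
  by_cases hlt : (m : Int) < (r.length : Int)
  all_goals by_cases hsub : 0 ≤ (m : Int) - n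
  · -- add and subtract
    have hc : (m : Int) - n = ((m - n.toNat : Nat) : Int) := by omega
    have hn' : n.toNat ≤ m := by omega
    have hlow : m - n.toNat < r.length := by omega
    have h1 : min (m + 1) r.length = min m r.length + 1 := by omega
    have h2 : min m r.length = m := by omega
    have h3 : m + 1 - n.toNat = (m - n.toNat) + 1 := by omega
    rw [hc, PySem.List.pyGetD_natCast]
    simp only [hlt, Int.natCast_nonneg, if_true, aS, h1, h2, h3,
      psum_succ r m (by omega), psum_succ r (m - n.toNat) hlow]
    exact pairS xs (by ring)
  · -- add only
    have h1 : min (m + 1) r.length = min m r.length + 1 := by omega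
    have h2 : min m r.length = m := by omega
    have h3 : m + 1 - n.toNat = m - n.toNat := by omega
    simp only [hlt, hsub, if_true, if_false, aS, h1, h2, h3,
      psum_succ r m (by omega)]
    exact pairS xs (by ring)
  · -- subtract only
    have hc : (m : Int) - n = ((m - n.toNat : Nat) : Int) := by omega
    have hlow : m - n.toNat < r.length := by omega
    have h1 : min (m + 1) r.length = min m r.length := by omega
    have h3 : m + 1 - n.toNat = (m - n.toNat) + 1 := by omega
    rw [hc, PySem.List.pyGetD_natCast]
    simp only [hlt, Int.natCast_nonneg, if_true, if_false, aS, h1, h3,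
      psum_succ r (m - n.toNat) hlow]
    exact pairS xs (by ring)
  · -- neither
    have h1 : min (m + 1) r.length = min m r.length := by omega
    have h3 : m + 1 - n.toNat = m - n.toNat := by omega
    simp only [hlt, hsub, if_false, aS, h1, h3]

-- A's fold over the first m indices produces the table of window sums
lemma afold (r : List Int) (n : Int) (hn : 0 ≤ n) (m : Nat)
    (hm : (m : Int) ≤ (r.length : Int) + n - 1) :
    (List.map (fun (k : Nat) => (k : Int)) (List.range m)).foldl (stepA r n) ([], 0)
      = ((List.range m).map (fun k => aS r n.toNat (k + 1)), aS r n.toNat m) := by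
  induction m with
  | zero => simp [aS, psum]
  | succ m ih =>
    have hm' : (m : Int) ≤ (r.length : Int) + n - 1 := by push_cast at hm ⊢; omega
    rw [List.range_succ, List.map_append, List.foldl_append, ih hm']
    simp only [List.map_cons, List.map_nil, List.foldl_cons, List.foldl_nil]
    rw [aS_step r n hn m (by push_cast at hm; omega)]
    simp

-- B's index arithmetic coincides with aS
lemma bIdx (r : List Int) (n : Int) (hn : 0 ≤ n) (k : Nat)
    (hk : (k : Int) < (r.length : Int) + n - 1) :
    PySem.List.pyGetD ((List.range (r.length + 1)).map (psum r)) (min ((k : Int) + 1) (r.length : Int)) 0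
      - PySem.List.pyGetD ((List.range (r.length + 1)).map (psum r)) (max 0 ((k : Int) - n + 1)) 0
      = aS r n.toNat (k + 1) := by
  have h1 : min ((k : Int) + 1) (r.length : Int) = ((min (k + 1) r.length : Nat) : Int) := by omega
  have h2 : max 0 ((k : Int) - n + 1) = ((k + 1 - n.toNat : Nat) : Int) := by omega
  rw [h1, h2, PySem.List.pyGetD_natCast, PySem.List.pyGetD_natCast,
    PySem.List.getD_map_range _ _ _ _ (by omega),
    PySem.List.getD_map_range _ _ _ _ (by omega)]
  rfl

-- ===== VERDICT (by name: the statement is the Claim_ definition above) =====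
theorem conv1_spec : Claim_equal_conv1 := by
  intro r n _ hn
  replace hn : 0 ≤ n ∨ (r.length : Int) + n - 1 ≤ 0 := hn
  unfold Spec_conv1 conv1 conv1_alt
  simp only [ptable]
  by_cases he : (r.length : Int) + n - 1 ≤ 0
  · have hnil : PySem.List.pyRange 0 ((r.length : Int) + n - 1) 1 = [] := by
      simp [PySem.List.pyRange]; omega
    simp [hnil]
  · have hn' : 0 ≤ n := by omega
    have hpos : 0 ≤ (r.length : Int) + n - 1 := by omega
    have hrange : PySem.List.pyRange 0 ((r.length : Int) + n - 1) 1
        = List.map (fun (k : Nat) => (k : Int)) (List.range ((r.length : Int) + n - 1).toNat) := by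
      rw [show ((r.length : Int) + n - 1) = ((((r.length : Int) + n - 1).toNat : Nat) : Int) by omega]
      exact PySem.List.pyRange_zero_natCast _
    rw [hrange, afold r n hn' _ (by omega), List.map_map]
    apply List.map_congr_left
    intro k hk
    rw [List.mem_range] at hk
    exact (bIdx r n hn' k (by omega)).symm
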